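-- pv_equiv track=rewrite | github.com/janderjanderjanderjander/Kodutood | Vanad/Proge/2. Ülesanded/2023-11-08/Debug.py | kontrolli_veergusid
-- ===== SOURCE A (Python) =====
-- def kontrolli_veergusid(maatriks):
--     mälu1 = 0
--     mälu2 = 0
--     mälu3 = 0
--     mälu4 = 0
--     mitmes = 0
--     mälu = []
--     for j in maatriks:
--         for i in j:
--             if mitmes == 0:
--                 mitmes += 1
--                 if i != " ":
--                     if mälu1 == 0:
--                         mälu1 = i
--                     else:
--                         mälu1 += i
--             elif mitmes == 1:
--                 mitmes += 1
--                 if i != " ":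
--                     if mälu2 == 0:
--                         mälu2 = i
--                     else:
--                         mälu2 += i
--             elif mitmes == 2:
--                 mitmes += 1
--                 if i != " ":
--                     if mälu3 == 0:
--                         mälu3 = i
--                     else:
--                         mälu3 += i
--             elif mitmes == 3:
--                 mitmes = 0
--                 if i != " ":
--                     if mälu4 == 0:
--                         mälu4 = i
--                     else:
--                         mälu4 += i
--     mälu.append(mälu1)
--     mälu.append(mälu2)
--     mälu.append(mälu3)
--     mälu.append(mälu4)
--     mitmes = 0
--     võimalused = ["XXX", "XXXO", "OXXX", "OOO", "OOOX", "XOOO"]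
--     for i in mälu:
--         if i in võimalused:
--             mitmes += 1
--     return mitmes
-- ===== SOURCE B (Python) =====
-- def kontrolli_veergusid(maatriks):
--     flat = [cell for row in maatriks for cell in row]
--     võimalused = ["XXX", "XXXO", "OXXX", "OOO", "OOOX", "XOOO"]
--     return sum(
--         "".join(cell for cell in flat[o::4] if cell != " ") in võimalused
--         for o in range(4)
--     )
-- ===== Notes on version B (the rewrite author's own statement) =====
-- stated objective: simpler
-- what changed: Instead of A's single distribution pass with a round-robin counter, four scalar accumulators and a four-branch if-chain, B makes four independent staged passes: it flattens the matrix once and builds each column directly as a stride slice flat[o::4] joined after filtering spaces, then counts matches with sum().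
import Mathlib
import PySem

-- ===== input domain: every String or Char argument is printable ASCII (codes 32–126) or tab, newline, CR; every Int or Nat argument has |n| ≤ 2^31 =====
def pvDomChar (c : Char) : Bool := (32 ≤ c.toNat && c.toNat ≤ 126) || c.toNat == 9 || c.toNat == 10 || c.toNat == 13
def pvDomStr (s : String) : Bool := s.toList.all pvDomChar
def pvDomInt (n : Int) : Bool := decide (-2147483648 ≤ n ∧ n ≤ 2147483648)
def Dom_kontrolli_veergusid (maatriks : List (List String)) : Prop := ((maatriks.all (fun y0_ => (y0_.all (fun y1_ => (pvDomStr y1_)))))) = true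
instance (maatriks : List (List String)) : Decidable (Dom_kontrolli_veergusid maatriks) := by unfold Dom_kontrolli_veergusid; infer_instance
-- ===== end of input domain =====

-- B replaces A's single distribution pass (round-robin counter, four scalar accumulators,
-- four-branch if-chain) by four independent staged passes: each column is the stride slice
-- flat[o::4] of the flattened matrix, space cells filtered out and joined; objective: simpler.

-- ===== PORT A =====
-- mälu1..mälu4 start as int 0 and later hold strings; ported as Option String (none = the int 0).
-- The final 'i in võimalused' test is False for the int 0 (none) and ordinary string membership otherwise.
def kvStepA (st : Option String × Option String × Option String × Option String × Int) (i : String) :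
    Option String × Option String × Option String × Option String × Int :=
  match st with
  | (m1, m2, m3, m4, mitmes) =>
    if mitmes = 0 then
      (if i ≠ " " then some (match m1 with | none => i | some s => s ++ i) else m1, m2, m3, m4, mitmes + 1)
    else if mitmes = 1 then
      (m1, if i ≠ " " then some (match m2 with | none => i | some s => s ++ i) else m2, m3, m4, mitmes + 1)
    else if mitmes = 2 then
      (m1, m2, if i ≠ " " then some (match m3 with | none => i | some s => s ++ i) else m3, m4, mitmes + 1)
    else if mitmes = 3 then
      (m1, m2, m3, if i ≠ " " then some (match m4 with | none => i | some s => s ++ i) else m4, 0)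
    else (m1, m2, m3, m4, mitmes)

def kontrolli_veergusid (maatriks : List (List String)) : Int :=
  let st := maatriks.foldl (fun st j => j.foldl kvStepA st) (none, none, none, none, 0)
  let mälu : List (Option String) := [st.1, st.2.1, st.2.2.1, st.2.2.2.1]
  let võimalused : List String := ["XXX", "XXXO", "OXXX", "OOO", "OOOX", "XOOO"]
  mälu.foldl (fun mitmes i =>
    match i with
    | some s => if s ∈ võimalused then mitmes + 1 else mitmes
    | none => mitmes) 0

-- ===== PORT B =====
-- flat[o::4] → PySem.List.slice? with step 4; the step is the literal 4 ≠ 0, so slice? is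
-- always 'some' and '.getD []' is only a totality guard; '"".join(…)' → String.join.
def kvCol (flat : List String) (o : Int) : String :=
  String.join (((PySem.List.slice? flat (some o) none 4).getD []).filter (fun cell => cell ≠ " "))

def kontrolli_veergusid_alt (maatriks : List (List String)) : Int :=
  let flat := maatriks.flatMap (fun row => row)
  let võimalused : List String := ["XXX", "XXXO", "OXXX", "OOO", "OOOX", "XOOO"]
  (PySem.List.pyRange 0 4 1).foldl
    (fun acc o => acc + (if kvCol flat o ∈ võimalused then 1 else 0)) 0

-- ===== PRECONDITION & SPEC =====
def Spec_kontrolli_veergusid (maatriks : List (List String)) (out : Int) : Prop := out = kontrolli_veergusid_alt maatriks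
instance (maatriks : List (List String)) (out : Int) : Decidable (Spec_kontrolli_veergusid maatriks out) := by unfold Spec_kontrolli_veergusid; infer_instance

-- ===== CLAIM (what is proved, stated in full; the proofs are below) =====
def Claim_equal_kontrolli_veergusid : Prop := ∀ (maatriks : List (List String)), Dom_kontrolli_veergusid maatriks → Spec_kontrolli_veergusid maatriks (kontrolli_veergusid maatriks)

-- ===== LEMMAS AND PROOFS =====

/-- Every 4th element of a list, starting with the head: the stride slice l[0::4]. -/
def every4 {α : Type} : List α → List α
  | [] => []
  | x :: xs => x :: every4 (xs.drop 3)
termination_by l => l.length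
decreasing_by simp [List.length_drop]

/-- A's int-0-or-string accumulator read back as the string it holds ('' for the int 0). -/
def kvOs : Option String → String
  | none => ""
  | some s => s

/-- The column string B builds from a stride list: non-space cells joined. -/
def gcol (m : List String) : String := String.join (m.filter (fun cell => cell ≠ " "))

theorem kvOs_step (m : Option String) (x : String) :
    kvOs (some (match m with | none => x | some s => s ++ x)) = kvOs m ++ x := by
  cases m <;> simp [kvOs]

theorem join_foldl (xs : List String) (a : String) :
    xs.foldl (fun r s => r ++ s) a = a ++ xs.foldl (fun r s => r ++ s) "" := by
  induction xs generalizing a with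
  | nil => simp
  | cons x xs ih =>
    simp only [List.foldl_cons]
    rw [ih (a ++ x), ih ("" ++ x), String.empty_append, String.append_assoc]

theorem join_cons (x : String) (xs : List String) :
    String.join (x :: xs) = x ++ String.join xs := by
  simp only [String.join, List.foldl_cons, String.empty_append]
  exact join_foldl xs x

theorem gcol_cons (x : String) (m : List String) :
    gcol (x :: m) = (if x = " " then gcol m else x ++ gcol m) := by
  unfold gcol
  by_cases hx : x = " " <;> simp [hx, join_cons]

/-- The slice?-range-filterMap computation of a stride-4 slice is `every4`. -/
theorem every4_filterMap {α : Type} (m : List α) :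
    List.filterMap (fun k => m[4 * k]?) (List.range ((m.length + 3) / 4)) = every4 m := by
  induction m using every4.induct with
  | case1 => simp [every4]
  | case2 x xs ih =>
    have hc : ((x :: xs).length + 3) / 4 = xs.length / 4 + 1 := by
      simp only [List.length_cons]; omega
    have hc' : ((xs.drop 3).length + 3) / 4 = xs.length / 4 := by
      simp only [List.length_drop]; omega
    rw [hc, List.range_succ_eq_map, List.filterMap_cons]
    simp only [Nat.mul_zero, List.getElem?_cons_zero, List.filterMap_map]
    rw [every4]
    congr 1
    rw [← ih, hc']
    apply List.filterMap_congr
    intro k _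
    have h4 : 4 * (Nat.succ k) = (4 * k + 3) + 1 := by omega
    simp only [Function.comp, h4, List.getElem?_cons_succ, List.getElem?_drop]
    congr 1
    omega

/-- flat[o::4] for a non-negative start o is every 4th element of `l.drop o`. -/
theorem stride_slice (l : List String) (o : Nat) :
    PySem.List.slice? l (some (o : Int)) none 4 = some (every4 (l.drop o)) := by
  unfold PySem.List.slice? PySem.List.sliceIndices
  have hno : ¬((o : Int) < 0) := by omega
  have hs4 : ¬((4 : Int) < 0) := by norm_num
  simp only [if_neg hno, if_neg hs4, if_neg (show (4:Int) ≠ 0 from by norm_num)]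
  by_cases ho : l.length ≤ o
  · have h1 : min (o : Int) (l.length : Int) = (l.length : Int) := by omega
    rw [h1, if_neg (show ¬((l.length : Int) < (l.length : Int)) from by omega)]
    simp [List.drop_eq_nil_of_le ho, every4]
  · replace ho := lt_of_not_ge ho
    have h1 : min (o : Int) (l.length : Int) = (o : Int) := by omega
    rw [h1, if_pos (show (o : Int) < (l.length : Int) from by exact_mod_cast ho)]
    have hcnt : (((l.length : Int) - (o : Int) + 4 - 1) / 4).toNat = ((l.drop o).length + 3) / 4 := by
      simp only [List.length_drop]; omega
    rw [hcnt, ← every4_filterMap (l.drop o)]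
    congr 1
    apply List.filterMap_congr
    intro k _
    have hidx : ((o : Int) + 4 * (k : Int)).toNat = o + 4 * k := by omega
    rw [hidx, ← List.getElem?_drop]

theorem kv_nested_foldl (maatriks : List (List String)) (st : Option String × Option String × Option String × Option String × Int) :
    maatriks.foldl (fun st j => j.foldl kvStepA st) st
      = (maatriks.flatMap (fun row => row)).foldl kvStepA st := by
  induction maatriks generalizing st with
  | nil => rfl
  | cons r rs ih => simp [List.flatMap_cons, List.foldl_append, ih]

/-- A's distribution fold, read back through `kvOs`, computes exactly the four stride
columns: at phase p, bucket i collects the stride starting at offset (i - p) mod 4. -/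
theorem kv_main (l : List String) (p : Nat) (hp : p < 4) (m1 m2 m3 m4 : Option String) :
    (fun st => (kvOs st.1, kvOs st.2.1, kvOs st.2.2.1, kvOs st.2.2.2.1))
        (l.foldl kvStepA (m1, m2, m3, m4, (p : Int)))
      = (kvOs m1 ++ gcol (every4 (l.drop ((4 - p) % 4))),
         kvOs m2 ++ gcol (every4 (l.drop ((5 - p) % 4))),
         kvOs m3 ++ gcol (every4 (l.drop ((6 - p) % 4))),
         kvOs m4 ++ gcol (every4 (l.drop ((7 - p) % 4)))) := by
  induction l generalizing p m1 m2 m3 m4 with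
  | nil =>
    simp [every4, gcol, String.join]
  | cons x xs ih =>
    interval_cases p
    · have hstep : kvStepA (m1, m2, m3, m4, ((0 : Nat) : Int)) x
          = (if x ≠ " " then some (match m1 with | none => x | some s => s ++ x) else m1,
             m2, m3, m4, ((1 : Nat) : Int)) := by
        simp [kvStepA]
      rw [List.foldl_cons, hstep, ih 1 (by omega)]
      norm_num [every4, gcol_cons]
      by_cases hx : x = " " <;> simp [hx, kvOs_step, String.append_assoc]
    · have hstep : kvStepA (m1, m2, m3, m4, ((1 : Nat) : Int)) x
          = (m1, if x ≠ " " then some (match m2 with | none => x | some s => s ++ x) else m2,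
             m3, m4, ((2 : Nat) : Int)) := by
        simp [kvStepA]
      rw [List.foldl_cons, hstep, ih 2 (by omega)]
      norm_num [every4, gcol_cons]
      by_cases hx : x = " " <;> simp [hx, kvOs_step, String.append_assoc]
    · have hstep : kvStepA (m1, m2, m3, m4, ((2 : Nat) : Int)) x
          = (m1, m2, if x ≠ " " then some (match m3 with | none => x | some s => s ++ x) else m3,
             m4, ((3 : Nat) : Int)) := by
        simp [kvStepA]
      rw [List.foldl_cons, hstep, ih 3 (by omega)]
      norm_num [every4, gcol_cons]
      by_cases hx : x = " " <;> simp [hx, kvOs_step, String.append_assoc]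
    · have hstep : kvStepA (m1, m2, m3, m4, ((3 : Nat) : Int)) x
          = (m1, m2, m3, if x ≠ " " then some (match m4 with | none => x | some s => s ++ x) else m4,
             ((0 : Nat) : Int)) := by
        simp [kvStepA]
      rw [List.foldl_cons, hstep, ih 0 (by omega)]
      norm_num [every4, gcol_cons]
      by_cases hx : x = " " <;> simp [hx, kvOs_step, String.append_assoc]

theorem kv_count (a : Option String) (m : Int) :
    (match a with
      | some s => if s ∈ ["XXX", "XXXO", "OXXX", "OOO", "OOOX", "XOOO"] then m + 1 else m
      | none => m)
      = m + (if kvOs a ∈ ["XXX", "XXXO", "OXXX", "OOO", "OOOX", "XOOO"] then 1 else 0) := by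
  cases a with
  | none => simp [kvOs]
  | some s => simp only [kvOs]; split_ifs <;> omega

theorem kvCol_eq (flat : List String) (o : Nat) :
    kvCol flat (o : Int) = gcol (every4 (flat.drop o)) := by
  unfold kvCol gcol
  rw [stride_slice]
  rfl

-- ===== VERDICT (by name: the statement is the Claim_ definition above) =====
theorem kontrolli_veergusid_spec : Claim_equal_kontrolli_veergusid := by
  intro maatriks _
  unfold Spec_kontrolli_veergusid kontrolli_veergusid kontrolli_veergusid_alt
  rw [kv_nested_foldl]
  have hrange : PySem.List.pyRange 0 4 1 = [0, 1, 2, 3] := by decide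
  have hmain := kv_main (maatriks.flatMap (fun row => row)) 0 (by omega) none none none none
  simp only [show (4 - 0) % 4 = 0 from rfl, show (5 - 0) % 4 = 1 from rfl,
    show (6 - 0) % 4 = 2 from rfl, show (7 - 0) % 4 = 3 from rfl, List.drop_zero,
    show kvOs none = "" from rfl, String.empty_append, Nat.cast_zero, Prod.mk.injEq] at hmain
  obtain ⟨e1, e2, e3, e4⟩ := hmain
  have h0 := kvCol_eq (maatriks.flatMap (fun row => row)) 0
  have h1 := kvCol_eq (maatriks.flatMap (fun row => row)) 1
  have h2 := kvCol_eq (maatriks.flatMap (fun row => row)) 2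
  have h3 := kvCol_eq (maatriks.flatMap (fun row => row)) 3
  simp only [Nat.cast_zero, Nat.cast_one, Nat.cast_ofNat, List.drop_zero] at h0 h1 h2 h3
  simp only [hrange, List.foldl_cons, List.foldl_nil, kv_count, e1, e2, e3, e4, h0, h1, h2, h3]
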